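-- pv_equiv track=rewrite | github.com/rbpelegrinojr/schedule | scheduler/engine.py | _valid_starts
-- ===== SOURCE A (Python) =====
-- def _valid_starts(duration):
--     """Return valid start slots for a block of given duration.
--
--     Slots 1-4 are the morning session (7:30-11:30).
--     Slots 5-8 are the afternoon session (1:00-5:00).
--     A block must not cross the lunch break between the two sessions.
--     """
--     valid = []
--     for start in range(1, 9):
--         end = start + duration - 1
--         if end <= 4:          # morning block
--             valid.append(start)
--         elif start >= 5 and end <= 8:  # afternoon block
--             valid.append(start)
--     return valid
-- ===== SOURCE B (Python) =====
-- def _valid_starts(duration):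
--     """Return valid start slots for a block of given duration.
--
--     Slots 1-4 are the morning session, 5-8 the afternoon session, and a
--     block may not cross lunch, so a block of length `duration` may start
--     at 1..5-duration (morning) or 5..9-duration (afternoon); either
--     range is empty when the block does not fit that session.
--     """
--     morning = list(range(1, 6 - duration))
--     afternoon = list(range(5, 10 - duration))
--     return morning + afternoon
-- ===== Notes on version B (the rewrite author's own statement) =====
-- stated objective: simpler
-- what changed: Replaces the slot-by-slot loop with direct construction of the two per-session start ranges; Pre_ excludes nonpositive durations, a degenerate corner where A's all-slots answer and B's range arithmetic are both accidents and neither is specified.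
-- outside the precondition, e.g. on _valid_starts(0): A returns [1, 2, 3, 4, 5, 6, 7, 8], B returns [1, 2, 3, 4, 5, 5, 6, 7, 8, 9]; on _valid_starts(-2): A returns [1, 2, 3, 4, 5, 6, 7, 8], B returns [1, 2, 3, 4, 5, 6, 7, 5, 6, 7, 8, 9, 10, 11]
import Mathlib
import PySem

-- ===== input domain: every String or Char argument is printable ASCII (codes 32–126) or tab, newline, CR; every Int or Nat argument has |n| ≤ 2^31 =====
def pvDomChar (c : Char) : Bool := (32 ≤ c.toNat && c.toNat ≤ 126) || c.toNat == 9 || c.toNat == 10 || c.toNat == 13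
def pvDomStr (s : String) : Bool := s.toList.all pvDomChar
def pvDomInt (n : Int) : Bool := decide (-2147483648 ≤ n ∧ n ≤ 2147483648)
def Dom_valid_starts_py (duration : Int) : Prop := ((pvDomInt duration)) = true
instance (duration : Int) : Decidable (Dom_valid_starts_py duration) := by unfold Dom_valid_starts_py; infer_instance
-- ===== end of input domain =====

-- B replaces A's slot-by-slot loop with direct construction of the two per-session start ranges (simpler).


-- ===== PORT A =====
def valid_starts_py (duration : Int) : List Int :=
  (PySem.List.pyRange 1 9 1).foldl
    (fun valid start =>
      let «end» := start + duration - 1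
      if «end» ≤ 4 then valid ++ [start]
      else if 5 ≤ start ∧ «end» ≤ 8 then valid ++ [start]
      else valid)
    []

-- ===== PORT B =====
def valid_starts_py_alt (duration : Int) : List Int :=
  let morning := PySem.List.pyRange 1 (6 - duration) 1
  let afternoon := PySem.List.pyRange 5 (10 - duration) 1
  morning ++ afternoon

-- ===== PRECONDITION & SPEC =====
-- Pre_ excludes nonpositive durations, a degenerate corner (no real block has length ≤ 0)
-- where A's all-slots answer and B's raw range arithmetic are both accidents of
-- end = start + duration - 1; neither value is specified by the function's purpose.
def Pre_valid_starts_py (duration : Int) : Prop := 1 ≤ duration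
instance (duration : Int) : Decidable (Pre_valid_starts_py duration) := by unfold Pre_valid_starts_py; infer_instance
def pvWitness_valid_starts_py : Int := 2

def Spec_valid_starts_py (duration : Int) (out : List Int) : Prop := out = valid_starts_py_alt duration
instance (duration : Int) (out : List Int) : Decidable (Spec_valid_starts_py duration out) := by unfold Spec_valid_starts_py; infer_instance

-- ===== CLAIM (what is proved, stated in full; the proofs are below) =====
def Claim_equal_valid_starts_py : Prop := ∀ (duration : Int), Dom_valid_starts_py duration → Pre_valid_starts_py duration → Spec_valid_starts_py duration (valid_starts_py duration)

-- ===== LEMMAS AND PROOFS =====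

-- A's loop is a filter of [1..8] by the combined (morning ∨ afternoon) slot condition.
theorem valid_starts_py_eq_filter (d : Int) :
    valid_starts_py d
      = (PySem.List.pyRange 1 9 1).filter
          (fun s => decide (s + d - 1 ≤ 4 ∨ (5 ≤ s ∧ s + d - 1 ≤ 8))) := by
  unfold valid_starts_py
  rw [PySem.List.foldl_congr_mem
      (g := fun valid s =>
        if s + d - 1 ≤ 4 ∨ (5 ≤ s ∧ s + d - 1 ≤ 8) then valid ++ [s] else valid)]
  · exact PySem.List.foldl_append_ite_eq_filter _ _ _
  · intro acc x _
    by_cases h1 : x + d - 1 ≤ 4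
    · simp [h1]
    · by_cases h2 : 5 ≤ x ∧ x + d - 1 ≤ 8 <;> simp [h1, h2]

theorem valid_starts_key (d : Int) (hd : 1 ≤ d) :
    valid_starts_py d = valid_starts_py_alt d := by
  rw [valid_starts_py_eq_filter]
  unfold valid_starts_py_alt
  rcases le_total d 8 with h8 | h8
  · interval_cases d <;> decide
  · -- d ≥ 8: no slot fits either session; both sides empty
    rw [List.filter_eq_nil_iff.mpr ?_,
        PySem.List.pyRange_one_eq_nil (by omega : 6 - d ≤ 1),
        PySem.List.pyRange_one_eq_nil (by omega : 10 - d ≤ 5)]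
    · rfl
    intro a ha
    rw [PySem.List.mem_pyRange_one] at ha
    simp only [decide_eq_true_eq]
    omega

-- ===== VERDICT (by name: the statement is the Claim_ definition above) =====
theorem valid_starts_py_spec : Claim_equal_valid_starts_py := by
  intro d _ hd
  exact valid_starts_key d hd
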